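-- pv_equiv track=rewrite | github.com/CTSRD-CHERI/l3-cheri-mips-proofs | scripts/CheriStateComponents.py | combineStateComponents_aux
-- ===== SOURCE A (Python) =====
-- def stateComponentsConflict(left, right):
--   sharedLength = min(len(left), len(right))
--   result = True
--   for i in range(0, sharedLength):
--     if (left[i] != right[i]):
--       result = False
--   return result
--
-- def combineStateComponents_aux(left, right):
--   result = []
--   for value1 in left:
--     conflictingValues = []
--     for value2 in right:
--       if stateComponentsConflict(value1, value2):
--         conflictingValues.append(value2)
--     if (len(conflictingValues) == 0):
--       # value1 does not conflict with any item in 'right'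
--       result.append(value1)
--     elif (len(conflictingValues) == 1):
--       if (len(value1) <= len(conflictingValues[0])):
--         # value1 is at least as general as value2
--         result.append(value1)
--     else:
--       # In this case value1 conflicts with multiple items
--       # i_0, ..., i_n in 'right'. Since we assume that no item in 'right'
--       # conflicts with another item in 'right', we know that i_0, ..., i_n
--       # don't conflict each other. Because they all conflict value1, this
--       # means that value1 is more general.
--       result.append(value1)
--   return result
-- ===== SOURCE B (Python) =====
-- def combineStateComponents_aux(left, right):
--     # Index 'right' by prefixes: for each key p, endc[p] = how many right items
--     # equal p, subc[p] = how many right items have p as a prefix, lens[p] = the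
--     # total length of those items.  Each left item is then decided by walking
--     # its own prefixes, with no scan over 'right'.
--     endc = {}
--     subc = {}
--     lens = {}
--     for r in right:
--         t = tuple(r)
--         endc[t] = endc.get(t, 0) + 1
--         for i in range(len(r) + 1):
--             p = t[:i]
--             subc[p] = subc.get(p, 0) + 1
--             lens[p] = lens.get(p, 0) + len(r)
--     result = []
--     for v in left:
--         t = tuple(v)
--         cnt = subc.get(t, 0)
--         tot = lens.get(t, 0)
--         for i in range(len(v)):
--             c = endc.get(t[:i], 0)
--             cnt += c
--             tot += c * i
--         if cnt != 1 or len(v) <= tot: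
--             result.append(v)
--     return result
-- ===== Notes on version B (the rewrite author's own statement) =====
-- stated objective: alternative
-- what changed: Instead of scanning all of `right` and re-checking element-by-element conflict for every left item, B builds three prefix-indexed dictionaries from `right` once (exact-match counts, prefix-subtree counts and length sums) and decides each left item by one walk over its own prefixes, using the fact that when exactly one right item conflicts, the indexed length sum is that item's length.
import Mathlib
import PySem

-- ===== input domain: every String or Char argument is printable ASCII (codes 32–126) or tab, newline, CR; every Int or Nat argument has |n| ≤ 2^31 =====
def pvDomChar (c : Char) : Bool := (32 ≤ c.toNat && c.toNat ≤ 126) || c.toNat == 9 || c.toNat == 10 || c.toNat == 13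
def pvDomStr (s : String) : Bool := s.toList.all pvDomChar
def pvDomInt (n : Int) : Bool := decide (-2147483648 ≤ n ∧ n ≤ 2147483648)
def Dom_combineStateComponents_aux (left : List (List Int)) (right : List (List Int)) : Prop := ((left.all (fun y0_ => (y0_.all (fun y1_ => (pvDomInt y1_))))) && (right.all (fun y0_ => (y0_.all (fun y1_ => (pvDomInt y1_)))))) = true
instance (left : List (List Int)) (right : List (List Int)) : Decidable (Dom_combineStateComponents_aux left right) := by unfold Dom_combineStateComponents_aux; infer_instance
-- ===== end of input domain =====

-- B replaces A's scan of `right` per left item by three prefix-indexed dictionaries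
-- built once from `right` (objective: alternative algorithm, same measured cost).


-- ===== PORT A =====
def stateComponentsConflict (left : List Int) (right : List Int) : Bool :=
  let sharedLength : Nat := min left.length right.length
  (PySem.List.pyRange 0 (sharedLength : Int) 1).foldl
    (fun result i =>
      if PySem.List.pyGet? left i ≠ PySem.List.pyGet? right i then false else result)
    true

def combineStateComponents_aux (left : List (List Int)) (right : List (List Int)) : List (List Int) :=
  left.foldl
    (fun result value1 =>
      let conflictingValues :=
        right.foldl
          (fun cv value2 =>
            if stateComponentsConflict value1 value2 then cv ++ [value2] else cv)
          []
      if conflictingValues.length = 0 then result ++ [value1]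
      else if conflictingValues.length = 1 then
        -- conflictingValues[0]: the guard ensures the list is non-empty
        (if value1.length ≤ (conflictingValues.headD []).length then result ++ [value1]
         else result)
      else result ++ [value1])
    []

-- ===== PORT B =====
def combineStateComponents_aux_alt (left : List (List Int)) (right : List (List Int)) : List (List Int) :=
  let tabs : PySem.Dict (List Int) Int × PySem.Dict (List Int) Int × PySem.Dict (List Int) Int :=
    right.foldl
      (fun tabs r =>
        let endc := tabs.1.insert r (tabs.1.getD r 0 + 1)
        (PySem.List.pyRange 0 ((r.length : Int) + 1) 1).foldl
          (fun tabs i =>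
            let p := PySem.List.slice r none (some i)
            (tabs.1,
             tabs.2.1.insert p (tabs.2.1.getD p 0 + 1),
             tabs.2.2.insert p (tabs.2.2.getD p 0 + (r.length : Int))))
          (endc, tabs.2.1, tabs.2.2))
      (PySem.Dict.empty, PySem.Dict.empty, PySem.Dict.empty)
  left.foldl
    (fun result v =>
      let ct : Int × Int :=
        (PySem.List.pyRange 0 ((v.length : Int)) 1).foldl
          (fun ct i =>
            let c := tabs.1.getD (PySem.List.slice v none (some i)) 0
            (ct.1 + c, ct.2 + c * i))
          (tabs.2.1.getD v 0, tabs.2.2.getD v 0)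
      if ct.1 ≠ 1 ∨ (v.length : Int) ≤ ct.2 then result ++ [v] else result)
    []

-- ===== PRECONDITION & SPEC =====
def Spec_combineStateComponents_aux (left : List (List Int)) (right : List (List Int)) (out : List (List Int)) : Prop := out = combineStateComponents_aux_alt left right
instance (left : List (List Int)) (right : List (List Int)) (out : List (List Int)) : Decidable (Spec_combineStateComponents_aux left right out) := by unfold Spec_combineStateComponents_aux; infer_instance

-- ===== CLAIM (what is proved, stated in full; the proofs are below) =====
def Claim_equal_combineStateComponents_aux : Prop := ∀ (left : List (List Int)) (right : List (List Int)), Dom_combineStateComponents_aux left right → Spec_combineStateComponents_aux left right (combineStateComponents_aux left right)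

-- ===== LEMMAS AND PROOFS =====

def cfl (v r : List Int) : Bool := v.isPrefixOf r || r.isPrefixOf v

def condA (right : List (List Int)) (v : List Int) : Bool :=
  let C := right.filter (fun r => stateComponentsConflict v r)
  if C.length = 0 then true
  else if C.length = 1 then decide (v.length ≤ (C.headD []).length)
  else true

def condB (right : List (List Int)) (v : List Int) : Bool :=
  decide (¬ (((right.filter (fun r => cfl v r)).length : Int) = 1)
    ∨ (v.length : Int) ≤ (((right.filter (fun r => cfl v r)).map (fun r => (r.length : Int))).sum))

lemma prefix_char (v r : List Int) :
    (∀ i, i < min v.length r.length → v[i]? = r[i]?) ↔ (v <+: r ∨ r <+: v) := by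
  induction v generalizing r with
  | nil => simp
  | cons a v ih =>
    cases r with
    | nil => simp
    | cons b r =>
      constructor
      · intro h
        have h0 := h 0 (by simp)
        simp only [List.getElem?_cons_zero, Option.some.injEq] at h0
        have hrest := (ih r).mp (fun i hi => by
          have := h (i+1) (by simp at hi ⊢; omega)
          simpa using this)
        rcases hrest with hp | hp
        · exact Or.inl (List.cons_prefix_cons.mpr ⟨h0, hp⟩)
        · exact Or.inr (List.cons_prefix_cons.mpr ⟨h0.symm, hp⟩)
      · intro h i hi
        have hrest : v <+: r ∨ r <+: v := by
          rcases h with hp | hp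
          · exact Or.inl (List.cons_prefix_cons.mp hp).2
          · exact Or.inr (List.cons_prefix_cons.mp hp).2
        have h0 : a = b := by
          rcases h with hp | hp
          · exact (List.cons_prefix_cons.mp hp).1
          · exact (List.cons_prefix_cons.mp hp).1.symm
        cases i with
        | zero => simp [h0]
        | succ j =>
          simp only [List.getElem?_cons_succ]
          exact (ih r).mpr hrest j (by simp at hi ⊢; omega)

lemma sCC_eq_cfl (v r : List Int) : stateComponentsConflict v r = cfl v r := by
  unfold stateComponentsConflict cfl
  have h1 : (PySem.List.pyRange 0 ((min v.length r.length : Nat) : Int) 1).foldl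
      (fun result i => if PySem.List.pyGet? v i ≠ PySem.List.pyGet? r i then false else result) true
      = (true && !(PySem.List.pyRange 0 ((min v.length r.length : Nat) : Int) 1).any
          (fun i => decide (PySem.List.pyGet? v i ≠ PySem.List.pyGet? r i))) := by
    rw [← PySem.List.foldl_if_false_eq]
    apply PySem.List.foldl_congr_mem
    intro acc x _; simp
  simp only [h1, Bool.true_and]
  rw [PySem.List.pyRange_zero_nat, List.any_map]
  rw [Bool.eq_iff_iff]
  simp only [Bool.not_eq_true', List.any_eq_false, Function.comp_apply,
    PySem.List.pyGet?_natCast, decide_eq_true_eq, not_not, List.mem_range, Bool.or_eq_true, List.isPrefixOf_iff_prefix]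
  constructor
  · intro h
    have := (prefix_char v r).mp (fun i hi => h i hi)
    simpa [List.isPrefixOf_iff_prefix] using this
  · intro h i hi
    exact (prefix_char v r).mpr (by simpa [cfl, List.isPrefixOf_iff_prefix] using h) i hi

lemma A_eq_filter (left right : List (List Int)) :
    combineStateComponents_aux left right = left.filter (condA right) := by
  unfold combineStateComponents_aux
  rw [PySem.List.foldl_congr_mem
    (g := fun result v => if condA right v then result ++ [v] else result)]
  · rw [PySem.List.foldl_append_if_eq_filter, List.nil_append]
  · intro acc v _
    simp only [PySem.List.foldl_append_if_eq_filter, List.nil_append]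
    have hC : condA right v = (if (List.filter (fun r => stateComponentsConflict v r) right).length = 0 then true
        else if (List.filter (fun r => stateComponentsConflict v r) right).length = 1 then
          decide (v.length ≤ ((List.filter (fun r => stateComponentsConflict v r) right).headD []).length)
        else true) := rfl
    rw [hC]
    by_cases h1 : (List.filter (fun r => stateComponentsConflict v r) right).length = 0
    · simp [h1]
    · by_cases h2 : (List.filter (fun r => stateComponentsConflict v r) right).length = 1
      · simp [h2]
      · simp [h1, h2]

def eF (right : List (List Int)) : PySem.Dict (List Int) Int :=
  right.foldl (fun e r => e.insert r (e.getD r 0 + 1)) PySem.Dict.empty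

def sF (right : List (List Int)) : PySem.Dict (List Int) Int :=
  right.foldl
    (fun s r => (((List.range (r.length + 1)).map (fun i => r.take i)).foldl
        (fun d k => d.insert k (d.getD k 0 + 1)) s))
    PySem.Dict.empty

def lF (right : List (List Int)) : PySem.Dict (List Int) Int :=
  right.foldl
    (fun s r => (((List.range (r.length + 1)).map (fun i => r.take i)).foldl
        (fun d k => d.insert k (d.getD k 0 + (r.length : Int))) s))
    PySem.Dict.empty

lemma dict_fold_const (ks : List (List Int)) (c : Int) (d : PySem.Dict (List Int) Int)
    (p : List Int) :
    (ks.foldl (fun d k => d.insert k (d.getD k 0 + c)) d).getD p 0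
      = d.getD p 0 + (ks.map (fun k => if p = k then c else 0)).sum := by
  induction ks generalizing d with
  | nil => simp
  | cons k ks ih =>
    simp only [List.foldl_cons, List.map_cons, List.sum_cons, ih,
      PySem.Dict.getD_insert]
    by_cases h : p = k
    · subst h; simp; ring
    · simp [h]

lemma take_sum (r x : List Int) (m : Nat) (hm : m ≤ r.length + 1) (w : Nat → Int) :
    ((List.range m).map (fun i => if x = r.take i then w i else 0)).sum
      = if x <+: r ∧ x.length < m then w x.length else 0 := by
  induction m with
  | zero => simp
  | succ m ih =>
    have hm' : m ≤ r.length + 1 := by omega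
    have hmr : m ≤ r.length := by omega
    rw [List.range_succ, List.map_append, List.sum_append, ih hm']
    have hlen : (r.take m).length = m := by simp [List.length_take]; omega
    by_cases hx : x <+: r
    · have hxr : x = r.take x.length := (List.prefix_iff_eq_take.mp hx)
      by_cases hl : x.length < m
      · have : ¬ x = r.take m := fun h => by rw [h] at hl; omega
        simp [hx, hl, this, Nat.lt_succ_of_lt hl]
      · by_cases he : x.length = m
        · have : x = r.take m := by rw [← he]; exact hxr
          rw [if_neg (fun h => hl h.2), if_pos (show x <+: r ∧ x.length < m+1 from ⟨hx, by omega⟩)]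
          simp [if_pos this, he]
        · have : ¬ x = r.take m := fun h => by rw [h] at he; simp [hlen] at he
          have : ¬ x.length < m + 1 := by omega
          simp [hx, ‹¬ x = r.take m›, this, hl]
    · have : ¬ x = r.take m := fun h => hx (h ▸ List.take_prefix m r)
      simp [hx, this]

lemma eF_getD (right : List (List Int)) (q : List Int) :
    (eF right).getD q 0 = (right.count q : Int) := by
  unfold eF
  rw [PySem.Dict.getD_foldl_insert_add_one]
  simp

lemma sF_getD (right : List (List Int)) (p : List Int) :
    (sF right).getD p 0 = (right.map (fun r => if p <+: r then (1:Int) else 0)).sum := by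
  unfold sF
  suffices h : ∀ d : PySem.Dict (List Int) Int,
      (right.foldl (fun s r => (((List.range (r.length + 1)).map (fun i => r.take i)).foldl
        (fun d k => d.insert k (d.getD k 0 + 1)) s)) d).getD p 0
      = d.getD p 0 + (right.map (fun r => if p <+: r then (1:Int) else 0)).sum by
    simpa using h PySem.Dict.empty
  induction right with
  | nil => simp
  | cons r rs ih =>
    intro d
    simp only [List.foldl_cons, ih, List.map_cons, List.sum_cons]
    rw [dict_fold_const, List.map_map]
    have : (fun k => if p = k then (1:Int) else 0) ∘ (fun i => r.take i)
        = fun i => if p = r.take i then (1:Int) else 0 := rfl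
    rw [this, take_sum r p (r.length + 1) (le_refl _) (fun _ => 1)]
    have hiff : (p <+: r ∧ p.length < r.length + 1) ↔ p <+: r :=
      ⟨fun h => h.1, fun h => ⟨h, Nat.lt_succ_of_le h.length_le⟩⟩
    rw [if_congr hiff rfl rfl]; ring

lemma lF_getD (right : List (List Int)) (p : List Int) :
    (lF right).getD p 0 = (right.map (fun r => if p <+: r then (r.length : Int) else 0)).sum := by
  unfold lF
  suffices h : ∀ d : PySem.Dict (List Int) Int,
      (right.foldl (fun s r => (((List.range (r.length + 1)).map (fun i => r.take i)).foldl
        (fun d k => d.insert k (d.getD k 0 + (r.length : Int))) s)) d).getD p 0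
      = d.getD p 0 + (right.map (fun r => if p <+: r then (r.length : Int) else 0)).sum by
    simpa using h PySem.Dict.empty
  induction right with
  | nil => simp
  | cons r rs ih =>
    intro d
    simp only [List.foldl_cons, ih, List.map_cons, List.sum_cons]
    rw [dict_fold_const, List.map_map]
    have : (fun k => if p = k then (r.length : Int) else 0) ∘ (fun i => r.take i)
        = fun i => if p = r.take i then (r.length : Int) else 0 := rfl
    rw [this, take_sum r p (r.length + 1) (le_refl _) (fun _ => (r.length : Int))]
    have hiff : (p <+: r ∧ p.length < r.length + 1) ↔ p <+: r :=
      ⟨fun h => h.1, fun h => ⟨h, Nat.lt_succ_of_le h.length_le⟩⟩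
    rw [if_congr hiff rfl rfl]; ring

lemma swap_sum (right : List (List Int)) (v : List Int) (w : Nat → Int) :
    ((List.range v.length).map
        (fun i => (right.map (fun r => if r = v.take i then w i else 0)).sum)).sum
      = (right.map (fun r => if r <+: v ∧ r.length < v.length then w r.length else 0)).sum := by
  induction right with
  | nil => simp
  | cons x rs ih =>
    simp only [List.map_cons, List.sum_cons]
    rw [PySem.List.sum_map_add_int (List.range v.length)
        (fun i => if x = v.take i then w i else 0)
        (fun i => (rs.map (fun r => if r = v.take i then w i else 0)).sum),
      ih, take_sum v x v.length (by omega) w]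

lemma sum_ite_filter (l : List (List Int)) (p : List Int → Bool) (f : List Int → Int) :
    (l.map (fun r => if p r then f r else 0)).sum = ((l.filter p).map f).sum := by
  induction l with
  | nil => simp
  | cons a l ih =>
    by_cases h : p a <;> simp [h, ih]

lemma foldl_triple {β : Type} (is : List β)
    (f g h : PySem.Dict (List Int) Int → β → PySem.Dict (List Int) Int)
    (e s ls : PySem.Dict (List Int) Int) :
    is.foldl (fun t i => (f t.1 i, g t.2.1 i, h t.2.2 i)) (e, s, ls)
      = (is.foldl f e, is.foldl g s, is.foldl h ls) := by
  induction is generalizing e s ls with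
  | nil => rfl
  | cons i is ih => simp [ih]

lemma prefix_both_eq (a b : List Int) (h1 : a <+: b) (h2 : b <+: a) : a = b :=
  List.IsPrefix.eq_of_length h1 (Nat.le_antisymm h1.length_le h2.length_le)

-- a conflicting r is either an extension of v or a strictly shorter prefix of v, never both
lemma ite_cfl (v r : List Int) (w : List Int → Int) :
    (if v <+: r then w r else 0) + (if r <+: v ∧ r.length < v.length then w r else 0)
      = if cfl v r then w r else 0 := by
  by_cases h1 : v <+: r
  · have h2 : ¬ (r <+: v ∧ r.length < v.length) := by
      rintro ⟨hp, hl⟩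
      rw [prefix_both_eq v r h1 hp] at hl; omega
    simp [cfl, h1, h2, List.isPrefixOf_iff_prefix]
  · by_cases h2 : r <+: v ∧ r.length < v.length
    · simp [cfl, h1, h2.1, h2, List.isPrefixOf_iff_prefix]
    · have h3 : ¬ r <+: v := by
        intro hp
        rcases Nat.lt_or_ge r.length v.length with hl | hl
        · exact h2 ⟨hp, hl⟩
        · exact h1 (List.IsPrefix.eq_of_length hp (Nat.le_antisymm hp.length_le hl) ▸ List.prefix_refl r)
      simp [cfl, h1, h3, List.isPrefixOf_iff_prefix]

lemma count_as_sum (right : List (List Int)) (q : List Int) (c : Int) :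
    (right.count q : Int) * c = (right.map (fun r => if r = q then c else 0)).sum := by
  induction right with
  | nil => simp
  | cons x rs ih =>
    by_cases h : x = q
    · subst h; simp [List.count_cons_self, ← ih]; ring
    · simp [h, ih]

lemma cnt_eq (right : List (List Int)) (v : List Int) :
    ((sF right).getD v 0
        + ((List.range v.length).map (fun i => (right.count (v.take i) : Int))).sum)
      = ((right.filter (fun r => cfl v r)).length : Int) := by
  have hmap : ∀ i : Nat, (right.count (v.take i) : Int)
      = (right.map (fun r => if r = v.take i then (1:Int) else 0)).sum := by
    intro i; simpa using count_as_sum right (v.take i) 1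
  rw [List.map_congr_left (fun i _ => hmap i), swap_sum right v (fun _ => (1:Int)), sF_getD,
    ← PySem.List.sum_map_add_int right (fun r => if v <+: r then (1:Int) else 0)
      (fun r => if r <+: v ∧ r.length < v.length then (1:Int) else 0)]
  have : (fun r => (if v <+: r then (1:Int) else 0)
      + (if r <+: v ∧ r.length < v.length then (1:Int) else 0))
      = fun r => if cfl v r then (1:Int) else 0 := by
    funext r; exact ite_cfl v r (fun _ => 1)
  rw [this, PySem.List.sum_map_ite_one_zero (fun r => cfl v r), List.countP_eq_length_filter]

lemma tot_eq (right : List (List Int)) (v : List Int) :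
    ((lF right).getD v 0
        + ((List.range v.length).map (fun i => (right.count (v.take i) : Int) * (i : Int))).sum)
      = ((right.filter (fun r => cfl v r)).map (fun r => (r.length : Int))).sum := by
  have hmap : ∀ i : Nat, (right.count (v.take i) : Int) * (i : Int)
      = (right.map (fun r => if r = v.take i then (i : Int) else 0)).sum := by
    intro i; exact count_as_sum right (v.take i) (i : Int)
  rw [List.map_congr_left (fun i _ => hmap i), swap_sum right v (fun i => (i : Int)), lF_getD,
    ← PySem.List.sum_map_add_int right (fun r => if v <+: r then (r.length : Int) else 0)
      (fun r => if r <+: v ∧ r.length < v.length then (r.length : Int) else 0)]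
  have : (fun r => (if v <+: r then (r.length : Int) else 0)
      + (if r <+: v ∧ r.length < v.length then (r.length : Int) else 0))
      = fun r => if cfl v r then (r.length : Int) else 0 := by
    funext r; exact ite_cfl v r (fun r => (r.length : Int))
  rw [this, sum_ite_filter right (fun r => cfl v r) (fun r => (r.length : Int))]

lemma B_eq_filter (left right : List (List Int)) :
    combineStateComponents_aux_alt left right = left.filter (condB right) := by
  unfold combineStateComponents_aux_alt
  have htabs : right.foldl
      (fun tabs r =>
        let endc := tabs.1.insert r (tabs.1.getD r 0 + 1)
        (PySem.List.pyRange 0 ((r.length : Int) + 1) 1).foldl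
          (fun tabs i =>
            let p := PySem.List.slice r none (some i)
            (tabs.1,
             tabs.2.1.insert p (tabs.2.1.getD p 0 + 1),
             tabs.2.2.insert p (tabs.2.2.getD p 0 + (r.length : Int))))
          (endc, tabs.2.1, tabs.2.2))
      (PySem.Dict.empty, PySem.Dict.empty, PySem.Dict.empty)
      = (eF right, sF right, lF right) := by
    rw [PySem.List.foldl_congr_mem right _ (fun t r =>
        (t.1.insert r (t.1.getD r 0 + 1),
         ((List.range (r.length + 1)).map (fun i => r.take i)).foldl
           (fun d k => d.insert k (d.getD k 0 + 1)) t.2.1,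
         ((List.range (r.length + 1)).map (fun i => r.take i)).foldl
           (fun d k => d.insert k (d.getD k 0 + (r.length : Int))) t.2.2)) _ ?_]
    · rw [foldl_triple right
            (fun e r => e.insert r (e.getD r 0 + 1))
            (fun t2 r => ((List.range (r.length + 1)).map (fun i => r.take i)).foldl
              (fun d k => d.insert k (d.getD k 0 + 1)) t2)
            (fun t3 r => ((List.range (r.length + 1)).map (fun i => r.take i)).foldl
              (fun d k => d.insert k (d.getD k 0 + (r.length : Int))) t3)]
      rfl
    · intro t r _
      show (PySem.List.pyRange 0 ((r.length : Int) + 1) 1).foldl _ _ = _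
      have hcast : ((r.length : Int) + 1) = ((r.length + 1 : Nat) : Int) := by push_cast; omega
      rw [hcast, PySem.List.pyRange_zero_nat, List.foldl_map,
        PySem.List.foldl_congr_mem (List.range (r.length + 1)) _
          (fun (t : PySem.Dict (List Int) Int × PySem.Dict (List Int) Int × PySem.Dict (List Int) Int) (i : Nat) =>
            (t.1,
             t.2.1.insert (r.take i) (t.2.1.getD (r.take i) 0 + 1),
             t.2.2.insert (r.take i) (t.2.2.getD (r.take i) 0 + (r.length : Int)))) _ ?_]
      · rw [foldl_triple (List.range (r.length + 1)) (fun a _ => a)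
            (fun s i => s.insert (r.take i) (s.getD (r.take i) 0 + 1))
            (fun s i => s.insert (r.take i) (s.getD (r.take i) 0 + (r.length : Int))),
          PySem.List.foldl_ignore]
        simp [List.foldl_map]
      · intro acc i _
        simp [PySem.List.slice_to_natCast]
  rw [htabs]
  rw [PySem.List.foldl_congr_mem left _
      (fun result v => if condB right v then result ++ [v] else result) [] ?_]
  · rw [PySem.List.foldl_append_if_eq_filter, List.nil_append]
  · intro acc v _
    show (if _ ≠ 1 ∨ ((v.length : Nat) : Int) ≤ _ then acc ++ [v] else acc) = _
    rw [PySem.List.foldl_prod_mk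
        (f := fun a i => a + (eF right).getD (PySem.List.slice v none (some i)) 0)
        (g := fun b i => b + (eF right).getD (PySem.List.slice v none (some i)) 0 * i),
      PySem.List.foldl_add, PySem.List.foldl_add, PySem.List.pyRange_zero_nat,
      List.map_map, List.map_map]
    have he1 : ((fun i => (eF right).getD (PySem.List.slice v none (some i)) 0) ∘ (fun (k : Nat) => (k : Int)))
        = fun k : Nat => (right.count (v.take k) : Int) := by
      funext k
      simp [PySem.List.slice_to_natCast, eF_getD]
    have he2 : ((fun i => (eF right).getD (PySem.List.slice v none (some i)) 0 * i) ∘ (fun (k : Nat) => (k : Int)))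
        = fun k : Nat => (right.count (v.take k) : Int) * (k : Int) := by
      funext k
      simp [PySem.List.slice_to_natCast, eF_getD]
    rw [he1, he2, cnt_eq right v, tot_eq right v]
    unfold condB
    simp only [decide_eq_true_eq, ne_eq]

lemma condA_eq_condB (right : List (List Int)) (v : List Int) :
    condA right v = condB right v := by
  unfold condA condB
  rw [List.filter_congr (fun r _ => sCC_eq_cfl v r)]
  rcases hC : right.filter (fun r => cfl v r) with _ | ⟨c, cs⟩
  · simp
  · rcases cs with _ | ⟨c2, cs2⟩
    · simp only [List.length_cons, List.length_nil, List.headD_cons, List.map_cons,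
        List.map_nil, List.sum_cons, List.sum_nil, add_zero]
      rw [Bool.eq_iff_iff]
      simp
    · simp only [List.length_cons, List.map_cons, List.sum_cons]
      rw [Bool.eq_iff_iff]
      constructor
      · intro _; simp; omega
      · intro _; simp

-- ===== VERDICT (by name: the statement is the Claim_ definition above) =====
theorem combineStateComponents_aux_spec : Claim_equal_combineStateComponents_aux := by
  intro left right _
  unfold Spec_combineStateComponents_aux
  rw [A_eq_filter, B_eq_filter]
  exact List.filter_congr (fun v _ => condA_eq_condB right v)
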